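-- pv_equiv track=rewrite | github.com/Julia557133/automacaoo_3INFOA | semana3/exercicio3.py | dividir_em_grupos
-- ===== SOURCE A (Python) =====
-- def dividir_em_grupos(matriculas):
--     grupo1 = []
--     grupo2 = []
--     grupo3 = []
--
--     for matricula in matriculas:
--         if matricula % 3 == 0:
--             grupo1.append(matricula)
--         elif matricula % 3 == 1:
--             grupo2.append(matricula)
--         else:
--             grupo3.append(matricula)
--
--     return grupo1, grupo2, grupo3
-- ===== SOURCE B (Python) =====
-- def dividir_em_grupos(matriculas):
--     lst = list(matriculas)
--     grupo1 = [m for m in lst if m % 3 == 0]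
--     grupo2 = [m for m in lst if m % 3 == 1]
--     grupo3 = [m for m in lst if m % 3 == 2]
--     return grupo1, grupo2, grupo3
-- ===== Notes on version B (the rewrite author's own statement) =====
-- stated objective: alternative
-- what changed: Replaces A's single three-way-branching accumulation pass with three independent filtering comprehensions, one scan per group.
import Mathlib
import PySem

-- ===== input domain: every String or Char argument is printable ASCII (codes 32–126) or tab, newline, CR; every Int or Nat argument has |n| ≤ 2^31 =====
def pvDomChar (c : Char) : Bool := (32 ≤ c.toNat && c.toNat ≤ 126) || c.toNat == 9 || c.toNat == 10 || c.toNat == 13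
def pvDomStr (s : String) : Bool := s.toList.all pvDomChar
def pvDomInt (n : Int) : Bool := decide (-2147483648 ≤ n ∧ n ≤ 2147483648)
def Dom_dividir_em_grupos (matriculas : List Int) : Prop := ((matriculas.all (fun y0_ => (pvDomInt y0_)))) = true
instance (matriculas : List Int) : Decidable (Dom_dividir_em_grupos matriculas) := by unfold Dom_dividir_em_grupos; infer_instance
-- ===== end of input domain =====

-- B builds each group with its own filtering pass instead of A's single branching accumulation loop (objective: alternative).

-- ===== PORT A =====
-- A's loop: one pass, three accumulators, append to the branch's group.
def dividir_em_grupos_loop (rest g1 g2 g3 : List Int) : List Int × List Int × List Int :=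
  match rest with
  | [] => (g1, g2, g3)
  | m :: rest' =>
    if PySem.Int.mod m 3 == 0 then dividir_em_grupos_loop rest' (g1 ++ [m]) g2 g3
    else if PySem.Int.mod m 3 == 1 then dividir_em_grupos_loop rest' g1 (g2 ++ [m]) g3
    else dividir_em_grupos_loop rest' g1 g2 (g3 ++ [m])

def dividir_em_grupos (matriculas : List Int) : List Int × List Int × List Int :=
  dividir_em_grupos_loop matriculas [] [] []

-- ===== PORT B =====
def dividir_em_grupos_alt (matriculas : List Int) : List Int × List Int × List Int :=
  (matriculas.filter (fun m => PySem.Int.mod m 3 == 0),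
   matriculas.filter (fun m => PySem.Int.mod m 3 == 1),
   matriculas.filter (fun m => PySem.Int.mod m 3 == 2))

-- ===== PRECONDITION & SPEC =====
def Spec_dividir_em_grupos (matriculas : List Int) (out : List Int × List Int × List Int) : Prop := out = dividir_em_grupos_alt matriculas
instance (matriculas : List Int) (out : List Int × List Int × List Int) : Decidable (Spec_dividir_em_grupos matriculas out) := by unfold Spec_dividir_em_grupos; infer_instance

-- ===== CLAIM (what is proved, stated in full; the proofs are below) =====
def Claim_equal_dividir_em_grupos : Prop := ∀ (matriculas : List Int), Dom_dividir_em_grupos matriculas → Spec_dividir_em_grupos matriculas (dividir_em_grupos matriculas)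

-- ===== LEMMAS AND PROOFS =====

-- Python's m % 3 with positive divisor is in {0,1,2}, so A's else-branch is exactly mod = 2.
theorem pv_mod3_cases (m : Int) : PySem.Int.mod m 3 = 0 ∨ PySem.Int.mod m 3 = 1 ∨ PySem.Int.mod m 3 = 2 := by
  rw [PySem.Int.mod_eq_emod_of_pos (by omega)]
  omega

theorem dividir_em_grupos_loop_spec (rest g1 g2 g3 : List Int) :
    dividir_em_grupos_loop rest g1 g2 g3 =
      (g1 ++ rest.filter (fun m => PySem.Int.mod m 3 == 0),
       g2 ++ rest.filter (fun m => PySem.Int.mod m 3 == 1),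
       g3 ++ rest.filter (fun m => PySem.Int.mod m 3 == 2)) := by
  induction rest generalizing g1 g2 g3 with
  | nil => simp [dividir_em_grupos_loop]
  | cons m rest' ih =>
    rcases pv_mod3_cases m with h | h | h <;>
      simp only [dividir_em_grupos_loop, List.filter, h, ih] <;> simp

theorem dividir_em_grupos_spec : Claim_equal_dividir_em_grupos := by
  intro matriculas _
  unfold Spec_dividir_em_grupos dividir_em_grupos dividir_em_grupos_alt
  simp [dividir_em_grupos_loop_spec]
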